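-- pv_equiv track=rewrite | github.com/jecki/DHParser | examples/LaTeX/testdata/GDE/Programme/SocialChoiceDemoSim_main.py | fullRanking
-- ===== SOURCE A (Python) =====
-- def fullRanking(utility):
--     """Returns a list of sets of indifferent alternatives representing
--     the 'utility'-list."""
--     indifferenceClasses = {}
--     for k,u in enumerate(utility):
--         indifferenceClasses.setdefault(u, set([])).add(k)
--     keys = list(indifferenceClasses.keys())
--     keys.sort()
--     keys.reverse()
--     return [indifferenceClasses[k] for k in keys]
-- ===== SOURCE B (Python) =====
-- def fullRanking(utility):
--     """Returns a list of sets of indifferent alternatives representing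
--     the 'utility'-list."""
--     pairs = sorted(enumerate(utility), key=lambda p: p[1], reverse=True)
--     result = []
--     i, n = 0, len(pairs)
--     while i < n:
--         j = i
--         while j < n and pairs[j][1] == pairs[i][1]:
--             j += 1
--         result.append({k for k, _ in pairs[i:j]})
--         i = j
--     return result
-- ===== Notes on version B (the rewrite author's own statement) =====
-- stated objective: alternative
-- what changed: Replaces the incremental dict-of-sets grouping (setdefault/add per element, then sort+reverse the keys) by one descending stable sort of the (index, utility) pairs followed by a single pass that collects each run of equal utilities into a set.
import Mathlib
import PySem

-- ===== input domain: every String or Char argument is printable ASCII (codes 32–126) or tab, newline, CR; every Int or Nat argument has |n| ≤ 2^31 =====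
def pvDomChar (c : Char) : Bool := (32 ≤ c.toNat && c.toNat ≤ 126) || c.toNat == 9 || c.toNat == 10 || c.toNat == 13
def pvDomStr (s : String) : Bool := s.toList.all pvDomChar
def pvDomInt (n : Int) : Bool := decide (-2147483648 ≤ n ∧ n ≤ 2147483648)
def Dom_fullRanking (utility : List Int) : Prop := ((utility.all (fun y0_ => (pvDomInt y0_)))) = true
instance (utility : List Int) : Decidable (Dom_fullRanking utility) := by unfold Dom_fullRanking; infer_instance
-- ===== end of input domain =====

-- B sorts the (index, utility) pairs once, descending by utility, and collects each run of
-- equal utilities into one set in a single pass — no dict of sets, no separate key sort;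
-- objective: alternative (the ports model the returned list of sets, each set as its
-- insertion-ordered element list).

-- ===== PORT A =====
def fullRanking (utility : List Int) : List (List Int) :=
  -- indifferenceClasses = {}; for k,u in enumerate(utility): setdefault(u, set()).add(k)
  let indifferenceClasses : PySem.Dict Int (PySem.Set Int) :=
    (PySem.List.enumerate utility 0).foldl
      (fun d p => d.modify p.2 PySem.Set.empty (fun s => PySem.Set.add s p.1))
      PySem.Dict.empty
  -- keys = list(keys()); keys.sort(); keys.reverse()
  let keys := (PySem.List.sorted indifferenceClasses.keys (fun x => x) false).reverse
  keys.map (fun k => indifferenceClasses.getD k PySem.Set.empty)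

-- ===== PORT B =====
-- the inner while loop scans the run of pairs sharing the current utility, collects their
-- indices as a set, and resumes after the run (takeWhile/dropWhile = the j-scan and i = j)
def pvGroupRuns : List (Int × Int) → List (List Int)
  | [] => []
  | p :: t =>
    PySem.Set.ofList ((p :: t.takeWhile (fun q => q.2 == p.2)).map (·.1))
      :: pvGroupRuns (t.dropWhile (fun q => q.2 == p.2))
termination_by l => l.length
decreasing_by
  have := List.length_dropWhile_le (fun q => q.2 == p.2) t
  simp; omega

def fullRanking_alt (utility : List Int) : List (List Int) :=
  -- pairs = sorted(enumerate(utility), key=lambda p: p[1], reverse=True); then group runs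
  pvGroupRuns (PySem.List.sorted (PySem.List.enumerate utility 0) (fun p => p.2) true)

-- ===== PRECONDITION & SPEC =====
def Spec_fullRanking (utility : List Int) (out : List (List Int)) : Prop := out = fullRanking_alt utility
instance (utility : List Int) (out : List (List Int)) : Decidable (Spec_fullRanking utility out) := by unfold Spec_fullRanking; infer_instance

-- ===== CLAIM (what is proved, stated in full; the proofs are below) =====
def Claim_equal_fullRanking : Prop := ∀ (utility : List Int), Dom_fullRanking utility → Spec_fullRanking utility (fullRanking utility)

-- ===== LEMMAS AND PROOFS =====

-- ---- A-side: the grouping loop's class for v is Set.add folded over the matching indices ----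
theorem getD_groupLoop (l : List (Int × Int)) (d : PySem.Dict Int (PySem.Set Int)) (v : Int) :
    (l.foldl (fun d p => d.modify p.2 PySem.Set.empty (fun s => PySem.Set.add s p.1)) d).getD v PySem.Set.empty
    = ((l.filter (fun p => p.2 == v)).map (·.1)).foldl PySem.Set.add (d.getD v PySem.Set.empty) := by
  induction l generalizing d with
  | nil => simp
  | cons p t ih =>
    simp only [List.foldl_cons, List.filter_cons]
    rw [ih, PySem.Dict.getD_modify]
    by_cases h : p.2 = v
    · simp [h]
    · simp [h, Ne.symm h]

theorem keys_groupLoop (utility : List Int) :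
    ((PySem.List.enumerate utility 0).foldl
      (fun d p => d.modify p.2 PySem.Set.empty (fun s => PySem.Set.add s p.1))
      PySem.Dict.empty).keys = PySem.Set.ofList utility := by
  rw [PySem.Dict.keys_foldl_modify_key]
  simp [PySem.List.map_snd_enumerate, PySem.Set.update, PySem.Set.ofList_eq_foldl]

-- reversing the ascending sort of the (duplicate-free) key set is the descending sort
theorem keys_sorted_reverse (utility : List Int) :
    (PySem.List.sorted (PySem.Set.ofList utility) (fun x => x) false).reverse
    = PySem.List.sorted (PySem.Set.ofList utility) (fun x => x) true := by
  symm
  apply PySem.List.sorted_rev_eq_of_perm_of_pairwise_gt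
  · exact (List.reverse_perm _).trans (PySem.List.sorted_perm _ _ _)
  · rw [List.pairwise_reverse]
    exact PySem.List.sorted_ofList_pairwise_lt utility

-- ---- B-side: stability of the descending sort w.r.t. filtering one key class ----
theorem filter_insertBy (x : Int × Int) (acc : List (Int × Int)) (v : Int)
    (h : acc.Pairwise (fun a b => b.2 ≤ a.2)) :
    (PySem.List.insertBy (fun a b => decide (b.2 < a.2)) x acc).filter (fun q => q.2 == v)
    = acc.filter (fun q => q.2 == v) ++ (if x.2 == v then [x] else []) := by
  induction acc with
  | nil =>
    by_cases hv : x.2 = v <;> simp [PySem.List.insertBy, List.filter, hv]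
  | cons y ys ih =>
    rw [List.pairwise_cons] at h
    rw [PySem.List.insertBy]
    by_cases hlt : y.2 < x.2
    · simp only [hlt, decide_true, if_true]
      by_cases hv : x.2 = v
      · have hnil : (y :: ys).filter (fun q => q.2 == v) = [] := by
          rw [List.filter_eq_nil_iff]
          intro q hq
          rcases List.mem_cons.mp hq with hq | hq
          · subst hq; simp; omega
          · have := h.1 q hq; simp; omega
        simp [List.filter_cons, hv, hnil]
      · have hv' : (x.2 == v) = false := by simp [hv]
        simp [List.filter_cons, hv']
    · simp only [hlt, decide_false, Bool.false_eq_true, if_false]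
      rw [List.filter_cons, List.filter_cons, ih h.2]
      by_cases hy : y.2 = v <;> simp [hy]

theorem foldl_insertBy_filter (l : List (Int × Int)) (acc : List (Int × Int)) (v : Int)
    (h : acc.Pairwise (fun a b => b.2 ≤ a.2)) :
    ((l.foldl (fun acc x => PySem.List.insertBy (fun a b => decide (b.2 < a.2)) x acc) acc).filter
      (fun q => q.2 == v))
    = acc.filter (fun q => q.2 == v) ++ l.filter (fun q => q.2 == v) := by
  induction l generalizing acc with
  | nil => simp
  | cons x t ih =>
    rw [List.foldl_cons, ih _ (PySem.List.insertBy_pairwise_ge (fun p => p.2) x acc h), filter_insertBy x acc v h,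
      List.filter_cons]
    by_cases hv : x.2 = v <;> simp [hv]

-- sorted(pairs, key=snd, reverse=True) is STABLE: each key class keeps its original order
theorem sorted_rev_filter_eq (e : List (Int × Int)) (v : Int) :
    (PySem.List.sorted e (fun p => p.2) true).filter (fun q => q.2 == v)
    = e.filter (fun q => q.2 == v) := by
  rw [PySem.List.sorted_rev_eq_foldl_insertBy]
  simpa using foldl_insertBy_filter e [] v (by simp)

-- first element of a dropWhile fails the predicate
theorem dropWhile_head_false {α : Type} (p : α → Bool) (l : List α) (x : α) (xs : List α)
    (h : l.dropWhile p = x :: xs) : p x = false := by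
  induction l with
  | nil => simp [List.dropWhile] at h
  | cons y ys ih =>
    rw [List.dropWhile] at h
    by_cases hy : p y
    · simp [hy] at h; exact ih h
    · simp [hy] at h; rcases h with ⟨h1, _⟩; subst h1; simpa using hy

-- ---- the run-grouping pass equals mapping the distinct keys (descending) over key-class filters ----
theorem pvGroupRuns_eq (l : List (Int × Int)) (vs : List Int)
    (hl : l.Pairwise (fun a b => b.2 ≤ a.2))
    (hvs : vs.Pairwise (fun a b => b < a))
    (hmem : ∀ v, v ∈ vs ↔ v ∈ l.map (·.2)) :
    pvGroupRuns l = vs.map (fun v => PySem.Set.ofList ((l.filter (fun p => p.2 == v)).map (·.1))) := by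
  induction l using pvGroupRuns.induct generalizing vs with
  | case1 =>
    have : vs = [] := by
      rw [List.eq_nil_iff_forall_not_mem]
      intro v hv
      simpa using (hmem v).mp hv
    subst this; simp [pvGroupRuns]
  | case2 p t ih =>
    have hdesc : ∀ q ∈ t, q.2 ≤ p.2 := (List.pairwise_cons.mp hl).1
    have htp : t.Pairwise (fun a b => b.2 ≤ a.2) := (List.pairwise_cons.mp hl).2
    -- the run and the rest
    set run := t.takeWhile (fun q => q.2 == p.2) with hrun
    set rest := t.dropWhile (fun q => q.2 == p.2) with hrest
    have hsplit : run ++ rest = t := List.takeWhile_append_dropWhile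
    have hrunval : ∀ q ∈ run, q.2 = p.2 := by
      intro q hq
      have := List.mem_takeWhile_imp hq
      simpa using this
    have hrestlt : ∀ q ∈ rest, q.2 < p.2 := by
      intro q hq
      cases hR : rest with
      | nil => rw [hR] at hq; simp at hq
      | cons r rs =>
        have hrf : (r.2 == p.2) = false := dropWhile_head_false _ t r rs (hrest ▸ hR)
        have hrt : r ∈ t := by
          rw [← hsplit]; exact List.mem_append_right _ (by simp [hR])
        have hr2 : r.2 < p.2 := lt_of_le_of_ne (hdesc r hrt) (by simpa using hrf)
        rw [hR] at hq
        rcases List.mem_cons.mp hq with hq | hq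
        · subst hq; exact hr2
        · -- q comes after r in rest, which is pairwise descending
          have hrp : rest.Pairwise (fun a b => b.2 ≤ a.2) :=
            List.Pairwise.sublist (List.dropWhile_sublist _) htp
          rw [hR, List.pairwise_cons] at hrp
          have := hrp.1 q hq
          omega
    -- vs = p.2 :: vs'
    have hp2 : p.2 ∈ vs := (hmem p.2).mpr (by simp)
    obtain ⟨v0, vs', rfl⟩ : ∃ v0 vs', vs = v0 :: vs' := by
      cases vs with
      | nil => simp at hp2
      | cons a b => exact ⟨a, b, rfl⟩
    have hv0 : v0 = p.2 := by
      rcases List.mem_cons.mp hp2 with h | h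
      · omega
      · have hlt := (List.pairwise_cons.mp hvs).1 p.2 h
        have hv0mem := (hmem v0).mp (by simp)
        rcases List.mem_map.mp hv0mem with ⟨q, hq, hq2⟩
        rcases List.mem_cons.mp hq with hq | hq
        · subst hq; omega
        · have := hdesc q hq; omega
    subst hv0
    have hvs'lt : ∀ v ∈ vs', v < p.2 := (List.pairwise_cons.mp hvs).1
    -- head group: filter of the whole list by p.2 is p :: run
    have hheadfilter : (p :: t).filter (fun q => q.2 == p.2) = p :: run := by
      rw [List.filter_cons]
      simp only [beq_self_eq_true, if_true]
      congr 1
      rw [← hsplit, List.filter_append]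
      have h1 : run.filter (fun q => q.2 == p.2) = run :=
        List.filter_eq_self.mpr (fun q hq => by simp [hrunval q hq])
      have h2 : rest.filter (fun q => q.2 == p.2) = [] :=
        List.filter_eq_nil_iff.mpr (fun q hq => by have := hrestlt q hq; simp; omega)
      rw [h1, h2, List.append_nil]
    -- tail groups: for v ∈ vs', filtering the whole list equals filtering rest
    have htailfilter : ∀ v ∈ vs', (p :: t).filter (fun q => q.2 == v) = rest.filter (fun q => q.2 == v) := by
      intro v hv
      have hvlt := hvs'lt v hv
      rw [List.filter_cons]
      have : (p.2 == v) = false := by simp; omega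
      rw [this, if_neg (by simp)]
      rw [← hsplit, List.filter_append]
      have h1 : run.filter (fun q => q.2 == v) = [] :=
        List.filter_eq_nil_iff.mpr (fun q hq => by have := hrunval q hq; simp; omega)
      rw [h1, List.nil_append]
    -- recurse on rest with vs'
    have hrec := ih vs' (List.Pairwise.sublist (List.dropWhile_sublist _) htp)
      (List.pairwise_cons.mp hvs).2
      (by
        intro v
        constructor
        · intro hv
          have hvl := (hmem v).mp (List.mem_cons_of_mem _ hv)
          rcases List.mem_map.mp hvl with ⟨q, hq, hq2⟩
          have hvlt := hvs'lt v hv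
          rcases List.mem_cons.mp hq with hq | hq
          · subst hq; omega
          · rw [← hsplit] at hq
            rcases List.mem_append.mp hq with hq | hq
            · have := hrunval q hq; omega
            · exact List.mem_map.mpr ⟨q, hq, hq2⟩
        · intro hv
          rcases List.mem_map.mp hv with ⟨q, hq, hq2⟩
          have hqlt := hrestlt q hq
          have hqt : q ∈ t := by
            rw [← hsplit]; exact List.mem_append_right _ hq
          have hvvs : v ∈ p.2 :: vs' := (hmem v).mpr
            (List.mem_map.mpr ⟨q, List.mem_cons_of_mem _ hqt, hq2⟩)
          rcases List.mem_cons.mp hvvs with hq3 | hq3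
          · omega
          · exact hq3)
    rw [pvGroupRuns, hrec]
    simp only [List.map_cons]
    congr 1
    · rw [hheadfilter, List.map_cons]
    · apply List.map_congr_left
      intro v hv
      rw [htailfilter v hv]

-- ===== VERDICT (by name: the statement is the Claim_ definition above) =====
theorem fullRanking_spec : Claim_equal_fullRanking := by
  intro utility _
  show fullRanking utility = fullRanking_alt utility
  unfold fullRanking fullRanking_alt
  dsimp only
  rw [keys_groupLoop, keys_sorted_reverse]
  rw [pvGroupRuns_eq _ (PySem.List.sorted (PySem.Set.ofList utility) (fun x => x) true)
    (PySem.List.sorted_pairwise_rev _ _)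
    (by
      rw [← keys_sorted_reverse, List.pairwise_reverse]
      exact PySem.List.sorted_ofList_pairwise_lt utility)
    (by
      intro v
      rw [PySem.List.mem_sorted, PySem.Set.mem_ofList]
      have hperm : ((PySem.List.sorted (PySem.List.enumerate utility 0) (fun p => p.2) true).map (fun x => x.2)).Perm utility := by
        have h1 := (PySem.List.sorted_perm (PySem.List.enumerate utility 0) (fun p => p.2) true).map (fun x => x.2)
        rw [PySem.List.map_snd_enumerate] at h1
        exact h1
      exact hperm.mem_iff.symm)]
  apply List.map_congr_left
  intro v _
  rw [getD_groupLoop, sorted_rev_filter_eq]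
  simp [PySem.Set.ofList_eq_foldl, PySem.Dict.getD, PySem.Dict.get?, PySem.Dict.empty]
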